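-- pv_equiv track=rewrite | github.com/oronaminc/SW-Expert-Academy | 5648.py | vague_meet
-- ===== SOURCE A (Python) =====
-- def vague_meet(atom, score):
--     # x의 값이 같을 때, 점들을 모아봐요
--     check_dic = {}
--     for Atom in atom:
--         if Atom[0] in check_dic:
--             check_dic[Atom[0]].append(Atom)
--         else:
--             check_dic[Atom[0]] = [Atom]
--     # 서로 애매하게 만날 때 점수를 추가해요
--     for c in check_dic:
--         check_dic[c].sort()
--         for i in range(len(check_dic[c])-1):
--             if check_dic[c][i+1][1]-check_dic[c][i][1]==1 and check_dic[c][i][2]==0 and check_dic[c][i+1][2]==1: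
--                 score += check_dic[c][i][3]
--                 score += check_dic[c][i+1][3]
--                 atom.remove(check_dic[c][i])
--                 atom.remove(check_dic[c][i+1])
--
--     # y 값이 같을 때, 점들을 모아봐요
--     check_dic = {}
--     for Atom in atom:
--         if Atom[1] in check_dic:
--             check_dic[Atom[1]].append(Atom)
--         else:
--             check_dic[Atom[1]] = [Atom]
--     # 서로 애매하게 만날 때 점수를 추가해요
--     for c in check_dic:
--         check_dic[c].sort()
--         for i in range(len(check_dic[c])-1):
--             if check_dic[c][i+1][0]-check_dic[c][i][0]==1 and check_dic[c][i][2]==3 and check_dic[c][i+1][2]==2: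
--                 score += check_dic[c][i][3]
--                 score += check_dic[c][i+1][3]
--                 atom.remove(check_dic[c][i])
--                 atom.remove(check_dic[c][i+1])
--
--     return atom, score
-- ===== SOURCE B (Python) =====
-- def vague_meet(atom, score):
--     # one global sort per phase instead of dict-of-buckets; scan adjacent pairs
--     for gi, ci, d_lo, d_hi in ((0, 1, 0, 1), (1, 0, 3, 2)):
--         ordered = sorted(atom, key=lambda a: [a[gi], a[ci]] + a[2:])
--         for u, v in zip(ordered, ordered[1:]):
--             if u[gi] == v[gi] and v[ci] - u[ci] == 1 and u[2] == d_lo and v[2] == d_hi: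
--                 score += u[3] + v[3]
--                 atom.remove(u)
--                 atom.remove(v)
--     return atom, score
-- ===== Notes on version B (the rewrite author's own statement) =====
-- stated objective: simpler
-- what changed: Each of A's two phases (build a dict of buckets keyed by one coordinate, sort every bucket, scan each bucket) is replaced by one global sort of the whole atom list under a composite key followed by a single adjacent-pair sweep guarded by key equality.
-- outside the precondition, e.g. on vague_meet([[1], [1]], 0): A raises IndexError, B raises IndexError
import Mathlib
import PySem

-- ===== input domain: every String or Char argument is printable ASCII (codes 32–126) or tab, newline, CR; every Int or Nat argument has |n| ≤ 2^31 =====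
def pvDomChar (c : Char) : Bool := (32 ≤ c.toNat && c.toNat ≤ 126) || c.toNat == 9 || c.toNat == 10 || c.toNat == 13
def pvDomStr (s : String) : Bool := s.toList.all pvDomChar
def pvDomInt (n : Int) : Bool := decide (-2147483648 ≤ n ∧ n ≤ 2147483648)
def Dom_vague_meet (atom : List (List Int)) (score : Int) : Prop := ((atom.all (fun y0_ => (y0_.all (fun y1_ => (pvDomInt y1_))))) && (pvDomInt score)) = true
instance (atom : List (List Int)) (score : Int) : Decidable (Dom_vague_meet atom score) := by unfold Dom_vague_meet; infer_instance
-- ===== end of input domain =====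

-- B replaces A's dict-of-buckets grouping (per phase) by one global sort followed by a
-- single adjacent-pair sweep; same return value, and both mutate `atom` in place in the
-- Python (the equivalence proved here is about the return value).

-- ===== PORT A =====
-- A, phase skeleton: group atoms into a dict keyed by coordinate gi (insertion order),
-- sort each bucket (plain list order), scan adjacent entries of each bucket; a matched
-- pair's scores are added and both atoms removed from `atom`.
-- `atom.remove(x)`: x is always present when that line runs (the matched pairs occupy
-- disjoint positions of the bucket, a sublist of `atom`), so List.erase is exact there.
-- All indices are in range on inputs admitted by Pre_, so pyGetD's default is never read.
def vmGroup (gi : Int) (atom : List (List Int)) : PySem.Dict Int (List (List Int)) :=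
  atom.foldl (fun d a =>
    let g := PySem.List.pyGetD a gi 0
    if d.contains g then d.insert g (d.getD g [] ++ [a]) else d.insert g [a])
    PySem.Dict.empty

-- the inner `for i in range(len(bucket)-1)` loop of A, state = (atom, score)
def vmScan (ci dLo dHi : Int) (bucket : List (List Int))
    (st : List (List Int) × Int) : List (List Int) × Int :=
  (PySem.List.pyRange 0 ((bucket.length : Int) - 1) 1).foldl (fun st i =>
    let u := PySem.List.pyGetD bucket i []
    let v := PySem.List.pyGetD bucket (i + 1) []
    if PySem.List.pyGetD v ci 0 - PySem.List.pyGetD u ci 0 == 1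
        && PySem.List.pyGetD u 2 0 == dLo && PySem.List.pyGetD v 2 0 == dHi then
      ((st.1.erase u).erase v, st.2 + PySem.List.pyGetD u 3 0 + PySem.List.pyGetD v 3 0)
    else st) st

-- one grouping phase of A (phase 1: gi=0 ci=1 dirs 0,1; phase 2: gi=1 ci=0 dirs 3,2)
def vmPhase (gi ci dLo dHi : Int) (st : List (List Int) × Int) : List (List Int) × Int :=
  let d := vmGroup gi st.1
  d.keys.foldl (fun st c =>
    vmScan ci dLo dHi (PySem.List.sorted (d.getD c []) (fun x => x)) st) st

def vague_meet (atom : List (List Int)) (score : Int) : List (List Int) × Int :=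
  vmPhase 1 0 3 2 (vmPhase 0 1 0 1 (atom, score))

-- ===== PORT B =====
-- B, sort key: [a[gi], a[ci]] + a[2:]
def vmKey (gi ci : Int) (a : List Int) : List Int :=
  [PySem.List.pyGetD a gi 0, PySem.List.pyGetD a ci 0] ++ PySem.List.slice a (some 2) none

-- one phase of B: sort all of atom once, sweep adjacent pairs (zip(ordered, ordered[1:]))
def vmSweep (gi ci dLo dHi : Int) (st : List (List Int) × Int) : List (List Int) × Int :=
  let ordered := PySem.List.sorted st.1 (vmKey gi ci)
  (ordered.zip (PySem.List.slice ordered (some 1) none)).foldl (fun st uv =>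
    if PySem.List.pyGetD uv.1 gi 0 == PySem.List.pyGetD uv.2 gi 0
        && PySem.List.pyGetD uv.2 ci 0 - PySem.List.pyGetD uv.1 ci 0 == 1
        && PySem.List.pyGetD uv.1 2 0 == dLo && PySem.List.pyGetD uv.2 2 0 == dHi then
      ((st.1.erase uv.1).erase uv.2,
        st.2 + PySem.List.pyGetD uv.1 3 0 + PySem.List.pyGetD uv.2 3 0)
    else st) st

def vague_meet_alt (atom : List (List Int)) (score : Int) : List (List Int) × Int :=
  [((0:Int), (1:Int), (0:Int), (1:Int)), (1, 0, 3, 2)].foldl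
    (fun st q => vmSweep q.1 q.2.1 q.2.2.1 q.2.2.2 st) (atom, score)

-- ===== PRECONDITION & SPEC =====
-- Pre_ excludes atom lists on which A reads a missing field and raises IndexError: it
-- admits lists whose atoms all have at least 4 fields, and also (shorter atoms of at
-- least 2 fields allowed) lists in which no two atoms sit on the same x at y-distance 1
-- nor on the same y at x-distance 1, so that no field past index 1 is ever read.
def Pre_vague_meet (atom : List (List Int)) (score : Int) : Prop :=
  (∀ a ∈ atom, 4 ≤ a.length) ∨
  ((∀ a ∈ atom, 2 ≤ a.length) ∧
    ∀ u ∈ atom, ∀ v ∈ atom,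
      (u.getD 0 0 = v.getD 0 0 → v.getD 1 0 - u.getD 1 0 ≠ 1) ∧
      (u.getD 1 0 = v.getD 1 0 → v.getD 0 0 - u.getD 0 0 ≠ 1))
instance (atom : List (List Int)) (score : Int) : Decidable (Pre_vague_meet atom score) := by
  unfold Pre_vague_meet; infer_instance

def pvWitness_vague_meet : List (List Int) × Int := ([[2, 5, 0, 7], [2, 6, 1, 9], [1, 5, 3, 4]], 10)

def Spec_vague_meet (atom : List (List Int)) (score : Int) (out : List (List Int) × Int) : Prop := out = vague_meet_alt atom score
instance (atom : List (List Int)) (score : Int) (out : List (List Int) × Int) : Decidable (Spec_vague_meet atom score out) := by unfold Spec_vague_meet; infer_instance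

-- ===== CLAIM (what is proved, stated in full; the proofs are below) =====
def Claim_equal_vague_meet : Prop := ∀ (atom : List (List Int)) (score : Int), Dom_vague_meet atom score → Pre_vague_meet atom score → Spec_vague_meet atom score (vague_meet atom score)

-- ===== LEMMAS AND PROOFS =====

-- adjacent pairs of a list
def vmAdj {γ : Type} (l : List γ) : List (γ × γ) := l.zip l.tail

-- the common pair-effect on the state (atom, score)
def vmPair (st : List (List Int) × Int) (p : List Int × List Int) : List (List Int) × Int :=
  ((st.1.erase p.1).erase p.2, st.2 + PySem.List.pyGetD p.1 3 0 + PySem.List.pyGetD p.2 3 0)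

def vmGuardA (ci dLo dHi : Int) (p : List Int × List Int) : Bool :=
  PySem.List.pyGetD p.2 ci 0 - PySem.List.pyGetD p.1 ci 0 == 1
    && PySem.List.pyGetD p.1 2 0 == dLo && PySem.List.pyGetD p.2 2 0 == dHi

def vmGuardB (gi ci dLo dHi : Int) (p : List Int × List Int) : Bool :=
  PySem.List.pyGetD p.1 gi 0 == PySem.List.pyGetD p.2 gi 0 && vmGuardA ci dLo dHi p

-- A's grouping key per phase
def vmKeyOf (gi : Int) (a : List Int) : Int := PySem.List.pyGetD a gi 0

-- phase-2 comparison key: swapping the first two coordinates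
def vmSwap2 : List Int → List Int
  | a :: b :: r => b :: a :: r
  | l => l

theorem vm_foldl_range_adj {γ β : Type} (d : γ) (f : β → γ → γ → β) :
    ∀ (t : List γ) (x : γ) (st : β),
      (List.range t.length).foldl
        (fun s i => f s ((x :: t).getD i d) ((x :: t).getD (i + 1) d)) st
      = ((x :: t).zip t).foldl (fun s p => f s p.1 p.2) st := by
  intro t
  induction t with
  | nil => intro x st; simp
  | cons b t ih =>
    intro x st
    rw [List.length_cons, List.range_succ_eq_map]
    simp only [List.foldl_cons, List.foldl_map, List.getD_cons_succ, List.getD_cons_zero]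
    have ih' := ih b (f st x b)
    simp only [List.getD_cons_succ] at ih'
    rw [ih']
    simp [List.zip]

theorem vmScan_eq (ci dLo dHi : Int) (bucket : List (List Int)) (st : List (List Int) × Int) :
    vmScan ci dLo dHi bucket st
      = ((vmAdj bucket).filter (vmGuardA ci dLo dHi)).foldl vmPair st := by
  cases bucket with
  | nil => simp [vmScan, vmAdj]
  | cons x t =>
    unfold vmScan
    have hlen : (((x :: t).length : Int) - 1) = (t.length : Int) := by
      simp [List.length_cons]
    rw [hlen, PySem.List.pyRange_zero_natCast, List.foldl_map]
    have hb : ∀ (s : List (List Int) × Int) (k : Nat),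
        (fun (st : List (List Int) × Int) (i : Int) =>
          let u := PySem.List.pyGetD (x :: t) i []
          let v := PySem.List.pyGetD (x :: t) (i + 1) []
          if PySem.List.pyGetD v ci 0 - PySem.List.pyGetD u ci 0 == 1
              && PySem.List.pyGetD u 2 0 == dLo && PySem.List.pyGetD v 2 0 == dHi then
            ((st.1.erase u).erase v, st.2 + PySem.List.pyGetD u 3 0 + PySem.List.pyGetD v 3 0)
          else st) s (k : Int)
        = (fun (s : List (List Int) × Int) (u v : List Int) =>
            if vmGuardA ci dLo dHi (u, v) then vmPair s (u, v) else s) s ((x :: t).getD k [])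
            ((x :: t).getD (k + 1) []) := by
      intro s k
      have h1 : ((k : Int) + 1) = ((k + 1 : Nat) : Int) := by push_cast; ring
      simp only [h1, PySem.List.pyGetD_natCast, vmGuardA, vmPair]
    simp only [hb]
    rw [vm_foldl_range_adj [] (fun (s : List (List Int) × Int) (u v : List Int) =>
      if vmGuardA ci dLo dHi (u, v) then vmPair s (u, v) else s) t x st]
    have : ∀ (s : List (List Int) × Int) (p : List Int × List Int),
        (if vmGuardA ci dLo dHi (p.1, p.2) then vmPair s (p.1, p.2) else s)
          = (if vmGuardA ci dLo dHi p then vmPair s p else s) := by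
      intro s p; rfl
    simp only [this]
    rw [PySem.List.foldl_if_eq_foldl_filter (vmGuardA ci dLo dHi) vmPair]
    rfl

theorem vmSweep_eq (gi ci dLo dHi : Int) (st : List (List Int) × Int) :
    vmSweep gi ci dLo dHi st
      = ((vmAdj (PySem.List.sorted st.1 (vmKey gi ci))).filter (vmGuardB gi ci dLo dHi)).foldl
          vmPair st := by
  unfold vmSweep
  simp only [PySem.List.slice_from _ (by omega : (0:Int) ≤ 1)]
  have hb : ∀ (s : List (List Int) × Int) (uv : List Int × List Int),
      (if PySem.List.pyGetD uv.1 gi 0 == PySem.List.pyGetD uv.2 gi 0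
          && PySem.List.pyGetD uv.2 ci 0 - PySem.List.pyGetD uv.1 ci 0 == 1
          && PySem.List.pyGetD uv.1 2 0 == dLo && PySem.List.pyGetD uv.2 2 0 == dHi then
        ((s.1.erase uv.1).erase uv.2,
          s.2 + PySem.List.pyGetD uv.1 3 0 + PySem.List.pyGetD uv.2 3 0)
      else s)
      = (if vmGuardB gi ci dLo dHi uv then vmPair s uv else s) := by
    intro s uv
    simp only [vmGuardB, vmGuardA, vmPair, Bool.and_assoc]
  simp only [hb]
  rw [PySem.List.foldl_if_eq_foldl_filter (vmGuardB gi ci dLo dHi) vmPair]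
  simp [vmAdj, List.drop_one]

theorem vmGroup_eq_modify (gi : Int) (atom : List (List Int)) :
    vmGroup gi atom
      = atom.foldl (fun d a => d.modify (vmKeyOf gi a) [] (· ++ [a])) PySem.Dict.empty := by
  unfold vmGroup
  congr 1
  funext d a
  show (if d.contains (PySem.List.pyGetD a gi 0) then _ else _) = _
  by_cases h : d.contains (PySem.List.pyGetD a gi 0)
  · simp [h, PySem.Dict.modify, vmKeyOf]
  · simp only [PySem.Dict.modify, vmKeyOf]
    rw [PySem.Dict.getD_of_not_contains]
    · simp
    · simp [h]

theorem vmGroup_keys (gi : Int) (atom : List (List Int)) :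
    (vmGroup gi atom).keys = PySem.List.dedup (atom.map (vmKeyOf gi)) := by
  rw [vmGroup_eq_modify]
  rw [PySem.Dict.keys_foldl_modify_key atom (vmKeyOf gi) [] (fun _ a => (· ++ [a])) PySem.Dict.empty]
  simp [PySem.List.dedup_eq_ofList]
  rfl

theorem vmGroup_getD (gi : Int) (atom : List (List Int)) (c : Int) :
    (vmGroup gi atom).getD c [] = atom.filter (fun a => vmKeyOf gi a == c) := by
  rw [vmGroup_eq_modify]
  have : atom.foldl (fun d a => d.modify (vmKeyOf gi a) [] (· ++ [a])) PySem.Dict.empty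
      = (atom.map (fun a => (vmKeyOf gi a, a))).foldl
          (fun d p => d.modify p.1 [] (· ++ [p.2])) PySem.Dict.empty := by
    rw [List.foldl_map]
  rw [this, PySem.Dict.getD_foldl_modify_append]
  simp only [List.filter_map, List.map_map]
  simp [Function.comp_def]

theorem vm_insertBy_congr {α : Type} (b1 b2 : α → α → Bool) (x : α) :
    ∀ ys : List α, (∀ y ∈ ys, b1 x y = b2 x y) →
      PySem.List.insertBy b1 x ys = PySem.List.insertBy b2 x ys := by
  intro ys
  induction ys with
  | nil => intro _; rfl
  | cons y ys ih =>
    intro h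
    show (if b1 x y then _ else _) = (if b2 x y then _ else _)
    rw [h y (by simp)]
    by_cases hb : b2 x y
    · simp [hb]
    · simp only [hb, Bool.false_eq_true, if_false]
      rw [ih (fun z hz => h z (by simp [hz]))]

theorem vm_sorted_congr {α κ : Type} [LT κ] [DecidableLT κ] (xs : List α) (k1 k2 : α → κ)
    (h : ∀ x ∈ xs, k1 x = k2 x) :
    PySem.List.sorted xs k1 = PySem.List.sorted xs k2 := by
  rw [PySem.List.sorted_eq_foldl_insertBy, PySem.List.sorted_eq_foldl_insertBy]
  have main : ∀ (l : List α) (acc : List α), (∀ x ∈ l, k1 x = k2 x) → (∀ y ∈ acc, k1 y = k2 y) →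
      l.foldl (fun acc x => PySem.List.insertBy (fun a b => decide (k1 a < k1 b)) x acc) acc
        = l.foldl (fun acc x => PySem.List.insertBy (fun a b => decide (k2 a < k2 b)) x acc) acc := by
    intro l
    induction l with
    | nil => intro acc _ _; rfl
    | cons x l ih =>
      intro acc hl hacc
      simp only [List.foldl_cons]
      rw [vm_insertBy_congr _ (fun a b => decide (k2 a < k2 b)) x acc
        (fun y hy => by rw [hl x (by simp), hacc y hy])]
      exact ih _ (fun z hz => hl z (by simp [hz]))
        (fun y hy => by
          rcases (PySem.List.mem_insertBy _ x y acc).1 hy with rfl | hy'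
          · exact hl y (by simp)
          · exact hacc y hy')
  exact main xs [] h (by simp)

theorem vm_partition_perm {α κ : Type} [DecidableEq κ] (key : α → κ) :
    ∀ (ks : List κ) (xs : List α), ks.Nodup → (∀ a ∈ xs, key a ∈ ks) →
      (ks.flatMap (fun c => xs.filter (fun a => key a == c))).Perm xs := by
  intro ks
  induction ks with
  | nil =>
    intro xs _ hcov
    have : xs = [] := by
      cases xs with
      | nil => rfl
      | cons a t => exact absurd (hcov a (by simp)) (by simp)
    simp [this]
  | cons c ks ih =>
    intro xs hnd hcov
    rw [List.flatMap_cons]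
    have heq : (ks.flatMap (fun c' => xs.filter (fun a => key a == c')))
        = ks.flatMap (fun c' => (xs.filter (fun a => !(key a == c))).filter
            (fun a => key a == c')) := by
      apply List.flatMap_congr
      intro c' hc'
      rw [List.filter_filter]
      apply List.filter_congr
      intro a _
      by_cases h : key a = c'
      · have hne : ¬ (key a = c) := fun hh => (List.nodup_cons.1 hnd).1 (hh ▸ h ▸ hc')
        simp only [h]
        simp
        exact fun hh => hne (h.trans hh)
      · simp [h]
    rw [heq]
    have hperm2 := ih (xs.filter (fun a => !(key a == c))) (List.nodup_cons.1 hnd).2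
      (by
        intro a ha
        rcases List.mem_filter.1 ha with ⟨hax, hne⟩
        simp only [Bool.not_eq_true', beq_eq_false_iff_ne, ne_eq] at hne
        rcases List.mem_cons.1 (hcov a hax) with h | h
        · exact absurd h hne
        · exact h)
    exact List.Perm.trans (List.Perm.append_left _ hperm2) (List.filter_append_perm _ xs)

theorem vmAdj_append {γ : Type} (xs ys : List γ) :
    vmAdj (xs ++ ys)
      = vmAdj xs
        ++ (match xs.getLast?, ys.head? with
            | some u, some v => [(u, v)]
            | _, _ => []) ++ vmAdj ys := by
  induction xs with
  | nil => simp [vmAdj]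
  | cons x xs ih =>
    cases xs with
    | nil =>
      cases ys with
      | nil => simp [vmAdj]
      | cons y t => simp [vmAdj, List.zip]
    | cons x' xs' =>
      have : vmAdj (x :: x' :: xs' ++ ys) = (x, x') :: vmAdj ((x' :: xs') ++ ys) := by
        simp [vmAdj, List.zip]
      rw [this, ih]
      have h2 : vmAdj (x :: x' :: xs') = (x, x') :: vmAdj (x' :: xs') := by
        simp [vmAdj, List.zip]
      rw [h2]
      simp [List.getLast?_cons_cons]

theorem vmAdj_filter_flatten {γ : Type} (g : γ × γ → Bool) :
    ∀ (Bs : List (List γ)),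
      Bs.Pairwise (fun b b' => ∀ u ∈ b, ∀ v ∈ b', g (u, v) = false) →
      (vmAdj Bs.flatten).filter g = Bs.flatMap (fun b => (vmAdj b).filter g) := by
  intro Bs
  induction Bs with
  | nil => intro _; simp [vmAdj]
  | cons b Bs ih =>
    intro hp
    rcases List.pairwise_cons.1 hp with ⟨hb, hp'⟩
    rw [List.flatten_cons, vmAdj_append, List.filter_append, List.filter_append,
      List.flatMap_cons, ih hp']
    have hmid : ((match b.getLast?, Bs.flatten.head? with
            | some u, some v => [(u, v)]
            | _, _ => []) : List (γ × γ)).filter g = [] := by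
      cases hu : b.getLast? with
      | none => simp
      | some u =>
        cases hv : Bs.flatten.head? with
        | none => simp
        | some v =>
          have hvmem : v ∈ Bs.flatten := List.mem_of_mem_head? (by rw [hv]; simp)
          rcases List.mem_flatten.1 hvmem with ⟨b', hb', hvb'⟩
          have := hb b' hb' u (List.mem_of_getLast? hu) v hvb'
          simp [this]
    rw [hmid]
    simp

theorem vmPhase_eq_foldl (gi ci dLo dHi : Int) (st : List (List Int) × Int) :
    vmPhase gi ci dLo dHi st
      = ((PySem.List.dedup (st.1.map (vmKeyOf gi))).flatMap (fun c =>
            (vmAdj (PySem.List.sorted (st.1.filter (fun a => vmKeyOf gi a == c)) (fun x => x))).filter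
              (vmGuardA ci dLo dHi))).foldl vmPair st := by
  unfold vmPhase
  simp only [vmScan_eq, vmGroup_keys, vmGroup_getD]
  rw [List.foldl_flatMap]

theorem vm_sorted_instEq {α κ : Type} [LT κ] (d1 d2 : DecidableLT κ) (xs : List α)
    (key : α → κ) (rev : Bool) :
    @PySem.List.sorted α κ _ d1 xs key rev = @PySem.List.sorted α κ _ d2 xs key rev := by
  congr 1

theorem vmPair_rcomm : ∀ (st : List (List Int) × Int) (p q : List Int × List Int),
    vmPair (vmPair st p) q = vmPair (vmPair st q) p := by
  intro st p q
  unfold vmPair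
  refine Prod.ext ?_ ?_
  · show (((st.1.erase p.1).erase p.2).erase q.1).erase q.2
        = (((st.1.erase q.1).erase q.2).erase p.1).erase p.2
    calc (((st.1.erase p.1).erase p.2).erase q.1).erase q.2
        = (((st.1.erase p.1).erase q.1).erase p.2).erase q.2 := by
          rw [List.erase_comm p.2 q.1]
      _ = (((st.1.erase q.1).erase p.1).erase p.2).erase q.2 := by
          rw [List.erase_comm p.1 q.1]
      _ = (((st.1.erase q.1).erase p.1).erase q.2).erase p.2 := by
          rw [List.erase_comm p.2 q.2]
      _ = (((st.1.erase q.1).erase q.2).erase p.1).erase p.2 := by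
          rw [List.erase_comm p.1 q.2]
  · show st.2 + _ + _ + _ + _ = st.2 + _ + _ + _ + _
    ring

theorem vmPhase_eq_vmSweep (gi ci dLo dHi : Int) (K : List Int → List Int)
    (HK : ∀ a : List Int, 2 ≤ a.length → vmKey gi ci a = K a)
    (Hinj : Function.Injective K)
    (Hle : ∀ a b : List Int, 2 ≤ a.length → 2 ≤ b.length →
      vmKeyOf gi a = vmKeyOf gi b → (a ≤ b ↔ K a ≤ K b))
    (Hlt : ∀ a b : List Int, 2 ≤ a.length → 2 ≤ b.length →
      vmKeyOf gi a < vmKeyOf gi b → K a < K b)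
    (st : List (List Int) × Int) (hpre : ∀ a ∈ st.1, 4 ≤ a.length) :
    vmPhase gi ci dLo dHi st = vmSweep gi ci dLo dHi st := by
  rw [vmPhase_eq_foldl, vmSweep_eq]
  set xs := st.1 with hxs
  have hlen2 : ∀ a ∈ xs, 2 ≤ a.length := fun a ha => le_trans (by omega) (hpre a ha)
  set key := vmKeyOf gi with hkey
  set dk := PySem.List.dedup (xs.map key) with hdk
  set sk := PySem.List.sorted dk (fun x => x) with hsk
  set block := fun c => PySem.List.sorted (xs.filter (fun a => key a == c)) (fun x : List Int => x)
    with hblock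
  -- membership facts about blocks
  have hblockmem : ∀ c, ∀ u ∈ block c, u ∈ xs ∧ key u = c := by
    intro c u hu
    rw [hblock] at hu
    have := (PySem.List.mem_sorted _ _ _ _).1 hu
    rcases List.mem_filter.1 this with ⟨h1, h2⟩
    exact ⟨h1, by simpa using h2⟩
  -- keys of sk
  have hsknodup : sk.Nodup := by
    rw [hsk]
    exact ((PySem.List.sorted_perm dk (fun x => x) false).nodup_iff).2 (PySem.List.nodup_dedup _)
  have hskcov : ∀ a ∈ xs, key a ∈ sk := by
    intro a ha
    rw [hsk, PySem.List.mem_sorted, hdk, PySem.List.mem_dedup]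
    exact List.mem_map_of_mem ha
  have hsklt : sk.Pairwise (· < ·) := by
    rw [hsk, hdk, PySem.List.dedup_eq_ofList]
    have h := PySem.List.sorted_ofList_pairwise_lt (κ := Int) (xs.map key)
    rw [vm_sorted_instEq LinearOrder.toDecidableLT (fun a b => Int.decLt a b) _ _ false] at h
    exact h
  -- step 2: the B sort key agrees with K on xs
  have hS : PySem.List.sorted xs (vmKey gi ci) = PySem.List.sorted xs K :=
    vm_sorted_congr xs _ K (fun a ha => HK a (hlen2 a ha))
  -- step 3: sorted xs K is the flatten of the per-key blocks
  have hflat : PySem.List.sorted xs K = ((sk.map block).flatten) := by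
    have hperm : (PySem.List.sorted xs K).Perm ((sk.map block).flatten) := by
      have h1 : (PySem.List.sorted xs K).Perm xs := PySem.List.sorted_perm _ _ _
      have h2 : ((sk.map block).flatten) = sk.flatMap block := by
        rw [List.flatMap_def]
      have h3 : (sk.flatMap block).Perm (sk.flatMap (fun c => xs.filter (fun a => key a == c))) :=
        List.Perm.flatMap (List.Perm.refl sk) (fun c _ => by
          rw [hblock]; exact PySem.List.sorted_perm _ _ _)
      have h4 := vm_partition_perm key sk xs hsknodup hskcov
      rw [h2]
      exact h1.trans (h4.symm.trans h3.symm)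
    have hpw1 : (PySem.List.sorted xs K).Pairwise (fun a b => K a ≤ K b) := by
      have h := PySem.List.sorted_pairwise xs K
      rw [vm_sorted_instEq LinearOrder.toDecidableLT (fun a b => List.decidableLT a b) xs K
        false] at h
      exact h
    have hpw2 : ((sk.map block).flatten).Pairwise (fun a b => K a ≤ K b) := by
      rw [List.pairwise_flatten]
      constructor
      · intro l hl
        rcases List.mem_map.1 hl with ⟨c, hc, rfl⟩
        have hpwid : (block c).Pairwise (fun a b => a ≤ b) := by
          rw [hblock]
          have h := PySem.List.sorted_pairwise (xs.filter (fun a => key a == c))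
            (fun x : List Int => x)
          rw [vm_sorted_instEq LinearOrder.toDecidableLT (fun a b => List.decidableLT a b) _ _
            false] at h
          exact h
        refine List.Pairwise.imp_of_mem ?_ hpwid
        intro a b ha hb hab
        rcases hblockmem c a ha with ⟨hax, hak⟩
        rcases hblockmem c b hb with ⟨hbx, hbk⟩
        exact (Hle a b (hlen2 a hax) (hlen2 b hbx) (hak.trans hbk.symm)).1 hab
      · rw [List.pairwise_map]
        refine List.Pairwise.imp_of_mem ?_ hsklt
        intro c c' hc hc' hlt u hu v hv
        rcases hblockmem c u hu with ⟨hux, huk⟩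
        rcases hblockmem c' v hv with ⟨hvx, hvk⟩
        exact le_of_lt (Hlt u v (hlen2 u hux) (hlen2 v hvx) (by rw [huk, hvk]; exact hlt))
    exact PySem.List.eq_of_perm_of_pairwise_le_of_injective K Hinj hperm hpw1 hpw2
  rw [hS, hflat]
  -- step 4: cut the adjacent-pair scan at block boundaries
  have hcut : (vmAdj ((sk.map block).flatten)).filter (vmGuardB gi ci dLo dHi)
      = (sk.map block).flatMap (fun b => (vmAdj b).filter (vmGuardB gi ci dLo dHi)) := by
    apply vmAdj_filter_flatten
    rw [List.pairwise_map]
    refine List.Pairwise.imp_of_mem ?_ hsklt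
    intro c c' hc hc' hlt u hu v hv
    rcases hblockmem c u hu with ⟨_, huk⟩
    rcases hblockmem c' v hv with ⟨_, hvk⟩
    have : key u ≠ key v := by rw [huk, hvk]; exact ne_of_lt hlt
    simp only [vmGuardB, Bool.and_eq_false_iff]
    left
    simpa [hkey, vmKeyOf] using this
  rw [hcut, List.flatMap_map]
  -- step 5: inside a block the gi-guard is redundant
  have hin : ∀ c ∈ sk, (vmAdj (block c)).filter (vmGuardB gi ci dLo dHi)
      = (vmAdj (block c)).filter (vmGuardA ci dLo dHi) := by
    intro c _
    apply List.filter_congr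
    intro p hp
    have h1 : p.1 ∈ block c := by
      rcases p with ⟨u, v⟩
      exact (List.of_mem_zip hp).1
    have h2 : p.2 ∈ block c := by
      rcases p with ⟨u, v⟩
      exact List.mem_of_mem_tail (List.of_mem_zip hp).2
    rcases hblockmem c p.1 h1 with ⟨_, h1k⟩
    rcases hblockmem c p.2 h2 with ⟨_, h2k⟩
    have : key p.1 = key p.2 := h1k.trans h2k.symm
    simp only [vmGuardB]
    rw [show (PySem.List.pyGetD p.1 gi 0 == PySem.List.pyGetD p.2 gi 0) = true by
      simpa [hkey, vmKeyOf] using this]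
    simp
  -- step 6/7: both sides fold vmPair over key-permuted pair lists
  have hperm : ((PySem.List.dedup (xs.map key)).flatMap (fun c =>
        (vmAdj (block c)).filter (vmGuardA ci dLo dHi))).Perm
      (sk.flatMap (fun c => (vmAdj (block c)).filter (vmGuardB gi ci dLo dHi))) := by
    have := List.Perm.flatMap (f := fun c => (vmAdj (block c)).filter (vmGuardA ci dLo dHi))
      (g := fun c => (vmAdj (block c)).filter (vmGuardA ci dLo dHi))
      (PySem.List.sorted_perm dk (fun x => x) false).symm (fun c _ => List.Perm.refl _)
    refine this.trans ?_
    exact List.Perm.flatMap (List.Perm.refl sk) (fun c hc => by rw [hin c hc])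
  haveI : RightCommutative vmPair := ⟨fun st p q => vmPair_rcomm st p q⟩
  exact List.Perm.foldl_eq hperm st

theorem vmSwap2_invol (l : List Int) : vmSwap2 (vmSwap2 l) = l := by
  match l with
  | [] => rfl
  | [a] => rfl
  | a :: b :: r => rfl

theorem vmSwap2_inj : Function.Injective vmSwap2 :=
  Function.LeftInverse.injective vmSwap2_invol

theorem vmKey01_eq_id (a : List Int) (h : 2 ≤ a.length) : vmKey 0 1 a = a := by
  match a, h with
  | a0 :: a1 :: r, _ =>
    unfold vmKey
    rw [PySem.List.slice_from _ (by omega : (0:Int) ≤ 2)]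
    simp [pysem]

theorem vmKey10_eq_swap (a : List Int) (h : 2 ≤ a.length) : vmKey 1 0 a = vmSwap2 a := by
  match a, h with
  | a0 :: a1 :: r, _ =>
    unfold vmKey
    rw [PySem.List.slice_from _ (by omega : (0:Int) ≤ 2)]
    simp [pysem, vmSwap2]

theorem vm_lt_swap2 (a0 a1 b0 b1 : Int) (r s : List Int) (h : a1 = b1) :
    (a0 :: a1 :: r) < (b0 :: b1 :: s) ↔ (a1 :: a0 :: r) < (b1 :: b0 :: s) := by
  subst h
  simp only [List.cons_lt_cons_iff, lt_self_iff_false, false_or, true_and]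

theorem vm_foldl_vmPair_subset (L : List (List Int × List Int)) :
    ∀ st : List (List Int) × Int, (L.foldl vmPair st).1 ⊆ st.1 := by
  induction L with
  | nil => intro st; exact fun _ h => h
  | cons p L ih =>
    intro st
    refine List.Subset.trans (ih (vmPair st p)) ?_
    exact List.Subset.trans (List.erase_subset) (List.erase_subset)

theorem vmPhase1_eq (st : List (List Int) × Int) (hpre : ∀ a ∈ st.1, 4 ≤ a.length) :
    vmPhase 0 1 0 1 st = vmSweep 0 1 0 1 st := by
  refine vmPhase_eq_vmSweep 0 1 0 1 (fun a => a) vmKey01_eq_id (fun a b h => h) ?_ ?_ st hpre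
  · intro a b _ _ _; exact Iff.rfl
  · intro a b ha hb hlt
    match a, b, ha, hb with
    | a0 :: a1 :: r, b0 :: b1 :: s, _, _ =>
      have : a0 < b0 := by simpa [vmKeyOf, pysem] using hlt
      exact (List.cons_lt_cons_iff).2 (Or.inl this)

theorem vmPhase2_eq (st : List (List Int) × Int) (hpre : ∀ a ∈ st.1, 4 ≤ a.length) :
    vmPhase 1 0 3 2 st = vmSweep 1 0 3 2 st := by
  refine vmPhase_eq_vmSweep 1 0 3 2 vmSwap2 vmKey10_eq_swap vmSwap2_inj ?_ ?_ st hpre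
  · intro a b ha hb hk
    match a, b, ha, hb with
    | a0 :: a1 :: r, b0 :: b1 :: s, _, _ =>
      have hk' : a1 = b1 := by simpa [vmKeyOf, pysem] using hk
      have h1 : ∀ x y : List Int, x ≤ y ↔ ¬ y < x := fun x y => (not_lt).symm
      rw [h1, h1]
      exact not_congr (vm_lt_swap2 b0 b1 a0 a1 s r hk'.symm)
  · intro a b ha hb hlt
    match a, b, ha, hb with
    | a0 :: a1 :: r, b0 :: b1 :: s, _, _ =>
      have : a1 < b1 := by simpa [vmKeyOf, pysem] using hlt
      exact (List.cons_lt_cons_iff).2 (Or.inl this)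

theorem vmSweep_pre (gi ci dLo dHi : Int) (st : List (List Int) × Int)
    (hpre : ∀ a ∈ st.1, 4 ≤ a.length) :
    ∀ a ∈ (vmSweep gi ci dLo dHi st).1, 4 ≤ a.length := by
  rw [vmSweep_eq]
  intro a ha
  exact hpre a (vm_foldl_vmPair_subset _ st ha)


theorem vm_mem_of_mem_vmAdj {γ : Type} (l : List γ) (p : γ × γ) (hp : p ∈ vmAdj l) :
    p.1 ∈ l ∧ p.2 ∈ l := by
  rcases p with ⟨u, v⟩
  exact ⟨(List.of_mem_zip hp).1, List.mem_of_mem_tail (List.of_mem_zip hp).2⟩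

theorem vmPhase_id (gi ci dLo dHi : Int) (st : List (List Int) × Int)
    (h : ∀ u ∈ st.1, ∀ v ∈ st.1, PySem.List.pyGetD u gi 0 = PySem.List.pyGetD v gi 0 →
      PySem.List.pyGetD v ci 0 - PySem.List.pyGetD u ci 0 ≠ 1) :
    vmPhase gi ci dLo dHi st = st := by
  rw [vmPhase_eq_foldl]
  have hnil : ((PySem.List.dedup (st.1.map (vmKeyOf gi))).flatMap (fun c =>
      (vmAdj (PySem.List.sorted (st.1.filter (fun a => vmKeyOf gi a == c)) (fun x => x))).filter
        (vmGuardA ci dLo dHi))) = [] := by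
    rw [List.flatMap_eq_nil_iff]
    intro c _
    rw [List.filter_eq_nil_iff]
    intro p hp
    rcases vm_mem_of_mem_vmAdj _ p hp with ⟨h1, h2⟩
    rw [PySem.List.mem_sorted] at h1 h2
    rcases List.mem_filter.1 h1 with ⟨h1x, h1k⟩
    rcases List.mem_filter.1 h2 with ⟨h2x, h2k⟩
    have hkeq : PySem.List.pyGetD p.1 gi 0 = PySem.List.pyGetD p.2 gi 0 := by
      have e1 : vmKeyOf gi p.1 = c := by simpa using h1k
      have e2 : vmKeyOf gi p.2 = c := by simpa using h2k
      simpa [vmKeyOf] using e1.trans e2.symm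
    have := h p.1 h1x p.2 h2x hkeq
    simp [vmGuardA, this]
  rw [hnil]
  rfl

theorem vmSweep_id (gi ci dLo dHi : Int) (st : List (List Int) × Int)
    (h : ∀ u ∈ st.1, ∀ v ∈ st.1, PySem.List.pyGetD u gi 0 = PySem.List.pyGetD v gi 0 →
      PySem.List.pyGetD v ci 0 - PySem.List.pyGetD u ci 0 ≠ 1) :
    vmSweep gi ci dLo dHi st = st := by
  rw [vmSweep_eq]
  have hnil : ((vmAdj (PySem.List.sorted st.1 (vmKey gi ci))).filter
      (vmGuardB gi ci dLo dHi)) = [] := by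
    rw [List.filter_eq_nil_iff]
    intro p hp
    rcases vm_mem_of_mem_vmAdj _ p hp with ⟨h1, h2⟩
    rw [PySem.List.mem_sorted] at h1 h2
    by_cases hk : PySem.List.pyGetD p.1 gi 0 = PySem.List.pyGetD p.2 gi 0
    · have := h p.1 h1 p.2 h2 hk
      simp [vmGuardB, vmGuardA, this]
    · simp [vmGuardB, hk]
  rw [hnil]
  rfl

-- ===== VERDICT (by name: the statement is the Claim_ definition above) =====
theorem vague_meet_spec : Claim_equal_vague_meet := by
  intro atom score _hdom hpre
  unfold Spec_vague_meet
  show vague_meet atom score = vague_meet_alt atom score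
  rcases hpre with h4 | ⟨_h2, hC⟩
  · have h1 := vmPhase1_eq (atom, score) h4
    have h2 := vmPhase2_eq (vmSweep 0 1 0 1 (atom, score))
      (vmSweep_pre 0 1 0 1 (atom, score) h4)
    simp only [vague_meet, vague_meet_alt, List.foldl, h1, h2]
  · have hx : ∀ u ∈ atom, ∀ v ∈ atom,
        PySem.List.pyGetD u (0:Int) 0 = PySem.List.pyGetD v (0:Int) 0 →
        PySem.List.pyGetD v (1:Int) 0 - PySem.List.pyGetD u (1:Int) 0 ≠ 1 := by
      intro u hu v hv hk
      have := (hC u hu v hv).1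
      simp only [PySem.List.pyGetD_ofNat'] at hk ⊢
      exact this hk
    have hy : ∀ u ∈ atom, ∀ v ∈ atom,
        PySem.List.pyGetD u (1:Int) 0 = PySem.List.pyGetD v (1:Int) 0 →
        PySem.List.pyGetD v (0:Int) 0 - PySem.List.pyGetD u (0:Int) 0 ≠ 1 := by
      intro u hu v hv hk
      have := (hC u hu v hv).2
      simp only [PySem.List.pyGetD_ofNat'] at hk ⊢
      exact this hk
    have hA : vague_meet atom score = (atom, score) := by
      unfold vague_meet
      rw [vmPhase_id 0 1 0 1 (atom, score) hx, vmPhase_id 1 0 3 2 (atom, score) hy]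
    have hB : vague_meet_alt atom score = (atom, score) := by
      unfold vague_meet_alt
      simp only [List.foldl]
      rw [vmSweep_id 0 1 0 1 (atom, score) hx, vmSweep_id 1 0 3 2 (atom, score) hy]
    rw [hA, hB]
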